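-- pv_equiv track=rewrite | github.com/Nav3011/QRCODE-generator | galoisField.py | galoisFieldValue
-- ===== SOURCE A (Python) =====
-- def galoisFieldValue(n):
-- 	if n == 0:
-- 		value = 1
-- 	else:
-- 		value = galoisFieldValue(n - 1) * 2
-- 		# if value > 255:
-- 		# 	return value
-- 	if value > 255:
-- 		value = value ^ 285
-- 	return value
-- ===== SOURCE B (Python) =====
-- def galoisFieldValue(n):
-- 	value = 1
-- 	for _ in range(n):
-- 		value *= 2
-- 		if value > 255:
-- 			value ^= 285
-- 	return value
-- ===== Notes on version B (the rewrite author's own statement) =====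
-- stated objective: simpler
-- what changed: Replaces the recursive multiply-then-reduce call chain by a single iterative loop threading the value through range(n).
import Mathlib
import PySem

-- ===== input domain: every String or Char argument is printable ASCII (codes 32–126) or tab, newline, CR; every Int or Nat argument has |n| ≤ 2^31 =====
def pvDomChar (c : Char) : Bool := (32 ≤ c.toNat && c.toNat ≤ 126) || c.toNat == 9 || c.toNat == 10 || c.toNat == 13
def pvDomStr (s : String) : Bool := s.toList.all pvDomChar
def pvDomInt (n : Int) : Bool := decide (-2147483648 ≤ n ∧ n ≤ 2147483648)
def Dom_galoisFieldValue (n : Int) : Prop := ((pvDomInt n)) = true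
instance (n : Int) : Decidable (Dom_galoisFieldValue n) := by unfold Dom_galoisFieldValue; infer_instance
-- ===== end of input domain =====

-- B replaces A's recursive multiply-then-reduce call chain by an iterative loop (simpler).


-- ===== PORT A =====
-- Nat-indexed form of A's recursion (faithful on Pre_, where the recursion terminates)
def galoisFieldValueAux : Nat → Int
  | k =>
    let value : Int := if k = 0 then 1 else galoisFieldValueAux (k - 1) * 2
    if value > 255 then PySem.Int.bxor value 285 else value

def galoisFieldValue (n : Int) : Int := galoisFieldValueAux n.toNat

-- ===== PORT B =====
def galoisFieldValue_alt (n : Int) : Int :=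
  (PySem.List.pyRange 0 n 1).foldl
    (fun value _ =>
      let value := value * 2
      if value > 255 then PySem.Int.bxor value 285 else value) 1

-- ===== PRECONDITION & SPEC =====
-- Pre_ excludes negative n, on which the Python A recurses without reaching the base case and raises RecursionError.
def Pre_galoisFieldValue (n : Int) : Prop := 0 ≤ n
instance (n : Int) : Decidable (Pre_galoisFieldValue n) := by unfold Pre_galoisFieldValue; infer_instance
def pvWitness_galoisFieldValue : Int := 5

def Spec_galoisFieldValue (n : Int) (out : Int) : Prop := out = galoisFieldValue_alt n
instance (n : Int) (out : Int) : Decidable (Spec_galoisFieldValue n out) := by unfold Spec_galoisFieldValue; infer_instance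

-- ===== CLAIM (what is proved, stated in full; the proofs are below) =====
def Claim_equal_galoisFieldValue : Prop := ∀ (n : Int), Dom_galoisFieldValue n → Pre_galoisFieldValue n → Spec_galoisFieldValue n (galoisFieldValue n)

-- ===== LEMMAS AND PROOFS =====
def gfStep (value : Int) : Int :=
  let value := value * 2
  if value > 255 then PySem.Int.bxor value 285 else value

theorem galoisFieldValueAux_succ (k : Nat) :
    galoisFieldValueAux (k + 1) = gfStep (galoisFieldValueAux k) := by
  rw [galoisFieldValueAux]
  simp [gfStep]

theorem foldl_range_gf (m : Nat) :
    (List.range m).foldl (fun v _ => gfStep v) 1 = galoisFieldValueAux m := by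
  induction m with
  | zero => rw [galoisFieldValueAux]; simp
  | succ k ih =>
    rw [List.range_succ, List.foldl_append, ih, galoisFieldValueAux_succ]
    rfl

-- ===== VERDICT (by name: the statement is the Claim_ definition above) =====
theorem galoisFieldValue_spec : Claim_equal_galoisFieldValue := by
  intro n _ hpre
  show galoisFieldValue n = galoisFieldValue_alt n
  unfold galoisFieldValue galoisFieldValue_alt
  rw [PySem.List.pyRange_one]
  rw [List.foldl_map]
  have : (n - 0).toNat = n.toNat := by omega
  rw [this]
  exact (foldl_range_gf n.toNat).symm
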